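-- pv_equiv track=rewrite | github.com/dislovemartin/Soln-Agents | AutoGroq/examples/run_real_benchmarks.py | _generate_batch_items
-- ===== SOURCE A (Python) =====
-- from typing import Dict, List, Any, Optional, Tuple
--
-- def _generate_batch_items(count: int) -> List[str]:
--     """Generate a list of batch items for testing."""
--     topics = [
--         "Solar energy adoption in residential settings",
--         "Wind power growth in offshore installations",
--         "Electric vehicle battery technology advancements",
--         "Smart grid implementation challenges",
--         "Hydrogen fuel cell applications in transportation",
--         "Geothermal energy potential in developing countries",
--         "Energy storage solutions for renewable integration",
--         "Tidal power commercial viability assessment",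
--         "Biofuel production from agricultural waste",
--         "Nuclear fusion research progress"
--     ]
--
--     # Generate batch items by repeating or extending the list
--     batch_items = []
--     while len(batch_items) < count:
--         batch_items.extend(topics[:min(count - len(batch_items), len(topics))])
--
--     return batch_items
-- ===== SOURCE B (Python) =====
-- from typing import List
--
-- def _generate_batch_items(count: int) -> List[str]:
--     """Generate a list of batch items for testing."""
--     topics = [
--         "Solar energy adoption in residential settings",
--         "Wind power growth in offshore installations",
--         "Electric vehicle battery technology advancements",
--         "Smart grid implementation challenges",
--         "Hydrogen fuel cell applications in transportation",
--         "Geothermal energy potential in developing countries",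
--         "Energy storage solutions for renewable integration",
--         "Tidal power commercial viability assessment",
--         "Biofuel production from agricultural waste",
--         "Nuclear fusion research progress"
--     ]
--     n = max(count, 0)
--     q, r = divmod(n, len(topics))
--     return topics * q + topics[:r]
-- ===== Notes on version B (the rewrite author's own statement) =====
-- stated objective: simpler
-- what changed: Replaced the while-loop that repeatedly extends the list with a closed-form construction: clamp count to non-negative, then list multiplication for the full blocks plus a remainder slice.
import Mathlib
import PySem

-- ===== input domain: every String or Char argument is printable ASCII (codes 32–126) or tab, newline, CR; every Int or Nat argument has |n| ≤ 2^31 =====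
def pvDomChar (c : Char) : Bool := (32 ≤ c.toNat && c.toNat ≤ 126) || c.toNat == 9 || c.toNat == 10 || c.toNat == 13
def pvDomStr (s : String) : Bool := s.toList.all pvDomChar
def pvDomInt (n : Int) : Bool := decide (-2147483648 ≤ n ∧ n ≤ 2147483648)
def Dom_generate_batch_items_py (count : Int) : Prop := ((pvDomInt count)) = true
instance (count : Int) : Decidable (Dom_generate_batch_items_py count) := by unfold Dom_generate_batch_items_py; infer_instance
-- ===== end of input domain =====

-- B replaces A's while-loop-with-extend by a closed form: clamp count to ≥ 0, then 'topics * (n // 10) + topics[:n % 10]' (simpler, no loop).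

-- ===== PORT A =====
-- the literal topics list shared by both ports (pure data)
def pvTopics : List String := [
  "Solar energy adoption in residential settings",
  "Wind power growth in offshore installations",
  "Electric vehicle battery technology advancements",
  "Smart grid implementation challenges",
  "Hydrogen fuel cell applications in transportation",
  "Geothermal energy potential in developing countries",
  "Energy storage solutions for renewable integration",
  "Tidal power commercial viability assessment",
  "Biofuel production from agricultural waste",
  "Nuclear fusion research progress"]

-- the while-loop of A; inside the loop the slice bound min(count-len, len(topics)) is ≥ 1,
-- so topics[:m] is exactly List.take m.toNat
def pvLoopA (count : Int) (acc : List String) : List String :=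
  if _h : (acc.length : Int) < count then
    pvLoopA count (acc ++ pvTopics.take (min (count - (acc.length : Int)) (pvTopics.length : Int)).toNat)
  else acc
termination_by (count - (acc.length : Int)).toNat
decreasing_by
  have h10 : pvTopics.length = 10 := by decide
  simp only [List.length_append, List.length_take, h10]
  omega

def generate_batch_items_py (count : Int) : List String := pvLoopA count []

-- ===== PORT B =====
def generate_batch_items_py_alt (count : Int) : List String :=
  let n : Int := max count 0
  let q : Int := PySem.Int.floordiv n (pvTopics.length : Int)
  let r : Int := PySem.Int.mod n (pvTopics.length : Int)
  (List.replicate q.toNat pvTopics).flatten ++ pvTopics.take r.toNat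

-- ===== PRECONDITION & SPEC =====
def Spec_generate_batch_items_py (count : Int) (out : List String) : Prop := out = generate_batch_items_py_alt count
instance (count : Int) (out : List String) : Decidable (Spec_generate_batch_items_py count out) := by unfold Spec_generate_batch_items_py; infer_instance

-- ===== CLAIM (what is proved, stated in full; the proofs are below) =====
def Claim_equal_generate_batch_items_py : Prop := ∀ (count : Int), Dom_generate_batch_items_py count → Spec_generate_batch_items_py count (generate_batch_items_py count)

-- ===== LEMMAS AND PROOFS =====

-- closed-form value of the remaining work when n items are still needed
def pvF (n : Nat) : List String :=
  (List.replicate (n / 10) pvTopics).flatten ++ pvTopics.take (n % 10)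

lemma pvF_step (n : Nat) (hn : 0 < n) :
    pvF n = pvTopics.take (min n 10) ++ pvF (n - min n 10) := by
  by_cases h10 : 10 ≤ n
  · have hmin : min n 10 = 10 := by omega
    have hdiv : n / 10 = (n - 10) / 10 + 1 := by omega
    have hmod : n % 10 = (n - 10) % 10 := by omega
    have htake : pvTopics.take 10 = pvTopics := by decide
    simp [pvF, hmin, hdiv, hmod, htake, List.replicate_succ, List.append_assoc]
  · have hmin : min n 10 = n := by omega
    have hdiv : n / 10 = 0 := by omega
    have hmod : n % 10 = n := by omega
    simp [pvF, hmin, hdiv, hmod]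

lemma pvLoopA_eq (n : Nat) : ∀ (count : Int) (acc : List String),
    (count - (acc.length : Int)).toNat = n → pvLoopA count acc = acc ++ pvF n := by
  induction n using Nat.strong_induction_on with
  | _ n ih =>
    intro count acc hn
    rw [pvLoopA.eq_def]
    by_cases h : (acc.length : Int) < count
    · have hpos : 0 < n := by omega
      have hd : count - (acc.length : Int) = (n : Int) := by omega
      have hk : (min (count - (acc.length : Int)) (pvTopics.length : Int)).toNat = min n 10 := by
        have h10 : (pvTopics.length : Int) = 10 := by decide
        rw [hd, h10]; omega
      have hlen : (pvTopics.take (min n 10)).length = min n 10 := by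
        have h10 : pvTopics.length = 10 := by decide
        simp only [List.length_take, h10]; omega
      have hrec := ih (n - min n 10) (by omega) count
        (acc ++ pvTopics.take (min n 10))
        (by simp only [List.length_append, hlen]; omega)
      simp only [h, dif_pos, hk, hrec, List.append_assoc]
      rw [pvF_step n hpos]
    · have hz : n = 0 := by omega
      simp [h, hz, pvF]

theorem generate_batch_items_py_spec : Claim_equal_generate_batch_items_py := by
  unfold Claim_equal_generate_batch_items_py
  intro count _
  unfold Spec_generate_batch_items_py generate_batch_items_py generate_batch_items_py_alt
  have h := pvLoopA_eq count.toNat count [] (by simp)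
  have h10 : (pvTopics.length : Int) = 10 := by decide
  have hq : (PySem.Int.floordiv (max count 0) (pvTopics.length : Int)).toNat = count.toNat / 10 := by
    have hf := PySem.Int.floordiv_eq_ediv_of_pos (a := max count 0) (b := (pvTopics.length : Int)) (by rw [h10]; norm_num)
    rw [hf, h10]
    omega
  have hr : (PySem.Int.mod (max count 0) (pvTopics.length : Int)).toNat = count.toNat % 10 := by
    have hm := PySem.Int.mod_eq_emod_of_pos (a := max count 0) (b := (pvTopics.length : Int)) (by rw [h10]; norm_num)
    rw [hm, h10]
    omega
  simp only [h, List.nil_append, pvF, hq, hr]
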